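-- pv_equiv track=rewrite | github.com/halogen28372/Tokenizer_Focus | arc_lago_tokenizer.py | perimeter_estimate
-- ===== SOURCE A (Python) =====
-- from typing import List, Tuple, Dict, Optional, Set
--
-- Point = Tuple[int, int]  # (row, col)
--
-- N4 = [(-1,0),(1,0),(0,-1),(0,1)]
--
-- def perimeter_estimate(points: Set[Point]) -> int:
--     # count exposed edges in 4-neigh
--     s = 0
--     P = set(points)
--     for (r,c) in points:
--         for dr,dc in N4:
--             if (r+dr, c+dc) not in P:
--                 s += 1
--     return s
-- ===== SOURCE B (Python) =====
-- def perimeter_estimate(points):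
--     # perimeter = 4*|cells| - 2*(number of internal shared edges);
--     # each adjacency is counted once by checking only right and down neighbors
--     P = set(points)
--     shared = 0
--     for (r, c) in points:
--         if (r, c + 1) in P:
--             shared += 1
--         if (r + 1, c) in P:
--             shared += 1
--     return 4 * len(points) - 2 * shared
-- ===== Notes on version B (the rewrite author's own statement) =====
-- stated objective: faster
-- what changed: Replaces the four-direction exposed-edge tally per cell by the closed formula 4*len(points) minus twice a shared-edge count obtained from a single half-direction (right/down) pass; Pre_ only asks the list to be duplicate-free, i.e. to actually represent the Python set argument.
import Mathlib
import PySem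

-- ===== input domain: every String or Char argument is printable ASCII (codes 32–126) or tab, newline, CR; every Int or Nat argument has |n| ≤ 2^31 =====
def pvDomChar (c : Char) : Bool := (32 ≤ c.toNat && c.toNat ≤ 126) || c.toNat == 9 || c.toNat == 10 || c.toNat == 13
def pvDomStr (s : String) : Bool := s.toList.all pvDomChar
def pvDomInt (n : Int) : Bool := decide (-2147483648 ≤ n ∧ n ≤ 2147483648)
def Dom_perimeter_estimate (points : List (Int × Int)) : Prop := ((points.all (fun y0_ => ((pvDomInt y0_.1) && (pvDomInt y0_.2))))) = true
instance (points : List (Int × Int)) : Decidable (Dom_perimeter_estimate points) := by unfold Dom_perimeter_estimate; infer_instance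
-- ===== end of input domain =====

-- B computes the perimeter as 4*len(points) minus twice a shared-edge count from a
-- half-direction (right/down) pass, instead of A's four-direction exposed-edge tally.


-- ===== PORT A =====
def N4 : List (Int × Int) := [(-1,0),(1,0),(0,-1),(0,1)]

def perimeter_estimate (points : List (Int × Int)) : Int :=
  let P : PySem.Set (Int × Int) := PySem.Set.ofList points
  points.foldl (fun s p =>
    N4.foldl (fun s d =>
      if ¬ (P.contains (p.1 + d.1, p.2 + d.2)) then s + 1 else s) s) 0

-- ===== PORT B =====
def perimeter_estimate_alt (points : List (Int × Int)) : Int :=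
  let P : PySem.Set (Int × Int) := PySem.Set.ofList points
  let shared : Int := points.foldl (fun a p =>
    let a := if P.contains (p.1, p.2 + 1) then a + 1 else a
    if P.contains (p.1 + 1, p.2) then a + 1 else a) 0
  4 * points.length - 2 * shared

-- ===== PRECONDITION & SPEC =====
-- The Python parameter is a SET of points; Pre_ excludes lists with duplicate points,
-- which do not represent a set (A tallies each duplicate occurrence separately there).
def Pre_perimeter_estimate (points : List (Int × Int)) : Prop := points.Nodup
instance (points : List (Int × Int)) : Decidable (Pre_perimeter_estimate points) := by unfold Pre_perimeter_estimate; infer_instance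

def pvWitness_perimeter_estimate : (List (Int × Int)) := [(0,0),(0,1),(1,1)]

def Spec_perimeter_estimate (points : List (Int × Int)) (out : Int) : Prop := out = perimeter_estimate_alt points
instance (points : List (Int × Int)) (out : Int) : Decidable (Spec_perimeter_estimate points out) := by unfold Spec_perimeter_estimate; infer_instance

-- ===== CLAIM (what is proved, stated in full; the proofs are below) =====
def Claim_equal_perimeter_estimate : Prop := ∀ (points : List (Int × Int)), Dom_perimeter_estimate points → Pre_perimeter_estimate points → Spec_perimeter_estimate points (perimeter_estimate points)

-- ===== LEMMAS AND PROOFS =====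

-- 0/1 indicator of membership, used to write both ports as sums
def pvInd (l : List (Int × Int)) (q : Int × Int) : Int := if q ∈ l then 1 else 0

theorem pvA_eq_sum (l : List (Int × Int)) :
    perimeter_estimate l =
      (l.map (fun p => 4 - (pvInd l (p.1 - 1, p.2) + pvInd l (p.1 + 1, p.2)
        + pvInd l (p.1, p.2 - 1) + pvInd l (p.1, p.2 + 1)))).sum := by
  have hA : perimeter_estimate l =
      List.foldl (fun s p => N4.foldl (fun s d =>
        if ¬ ((PySem.Set.ofList l).contains (p.1 + d.1, p.2 + d.2)) then s + 1 else s) s) 0 l := rfl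
  rw [hA]
  have hstep : (fun s (p : Int × Int) =>
      N4.foldl (fun s d =>
        if ¬ ((PySem.Set.ofList l).contains (p.1 + d.1, p.2 + d.2)) then s + 1 else s) s)
      = (fun s p => s + (4 - (pvInd l (p.1 - 1, p.2) + pvInd l (p.1 + 1, p.2)
          + pvInd l (p.1, p.2 - 1) + pvInd l (p.1, p.2 + 1)))) := by
    funext s p
    simp only [N4, List.foldl, pvInd]
    have e1 : (p.1 + -1, p.2 + 0) = (p.1 - 1, p.2) := by ring_nf
    have e2 : (p.1 + 1, p.2 + 0) = (p.1 + 1, p.2) := by ring_nf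
    have e3 : (p.1 + 0, p.2 + -1) = (p.1, p.2 - 1) := by ring_nf
    have e4 : (p.1 + 0, p.2 + 1) = (p.1, p.2 + 1) := by ring_nf
    rw [e1, e2, e3, e4]
    by_cases c1 : (p.1 - 1, p.2) ∈ l <;> by_cases c2 : (p.1 + 1, p.2) ∈ l <;>
      by_cases c3 : (p.1, p.2 - 1) ∈ l <;> by_cases c4 : (p.1, p.2 + 1) ∈ l <;>
      simp [c1, c2, c3, c4] <;> ring
  rw [hstep, PySem.List.foldl_add]; ring

theorem pvB_eq_sum (l : List (Int × Int)) :
    perimeter_estimate_alt l =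
      4 * l.length - 2 * (l.map (fun p => pvInd l (p.1, p.2 + 1) + pvInd l (p.1 + 1, p.2))).sum := by
  have hB : perimeter_estimate_alt l = 4 * l.length - 2 *
      List.foldl (fun a (p : Int × Int) =>
        let a := if (PySem.Set.ofList l).contains (p.1, p.2 + 1) then a + 1 else a
        if (PySem.Set.ofList l).contains (p.1 + 1, p.2) then a + 1 else a) 0 l := rfl
  rw [hB]
  have hstep : (fun a (p : Int × Int) =>
      let a := if (PySem.Set.ofList l).contains (p.1, p.2 + 1) then a + 1 else a
      if (PySem.Set.ofList l).contains (p.1 + 1, p.2) then a + 1 else a)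
      = (fun a p => a + (pvInd l (p.1, p.2 + 1) + pvInd l (p.1 + 1, p.2))) := by
    funext a p
    simp only [pvInd]
    by_cases c1 : (p.1, p.2 + 1) ∈ l <;> by_cases c2 : (p.1 + 1, p.2) ∈ l <;>
      simp [c1, c2] <;> ring
  rw [hstep, PySem.List.foldl_add]; ring_nf

-- the number of points whose u-shifted neighbor is present equals the number whose
-- (-u)-shifted neighbor is present (pair p with p+u): the pairing argument behind B's formula
theorem pvShiftCount (l : List (Int × Int)) (hl : l.Nodup) (u : Int × Int) :
    (l.map (fun p => pvInd l (p.1 + u.1, p.2 + u.2))).sum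
      = (l.map (fun p => pvInd l (p.1 - u.1, p.2 - u.2))).sum := by
  have hind : ∀ q : Int × Int, pvInd l q = if decide (q ∈ l) = true then 1 else 0 := by
    intro q; simp [pvInd]
  have h1 : (l.map (fun p => pvInd l (p.1 + u.1, p.2 + u.2))).sum
      = ((l.countP (fun p => decide ((p.1 + u.1, p.2 + u.2) ∈ l)) : Nat) : Int) := by
    simp only [hind]; exact PySem.List.sum_map_ite_one_zero _ l
  have h2 : (l.map (fun p => pvInd l (p.1 - u.1, p.2 - u.2))).sum
      = ((l.countP (fun p => decide ((p.1 - u.1, p.2 - u.2) ∈ l)) : Nat) : Int) := by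
    simp only [hind]; exact PySem.List.sum_map_ite_one_zero _ l
  rw [h1, h2]
  congr 1
  rw [List.countP_eq_length_filter, List.countP_eq_length_filter]
  rw [← List.toFinset_card_of_nodup (hl.filter _), ← List.toFinset_card_of_nodup (hl.filter _)]
  rw [List.toFinset_filter, List.toFinset_filter]
  apply Finset.card_bij' (fun p _ => (p.1 + u.1, p.2 + u.2)) (fun q _ => (q.1 - u.1, q.2 - u.2))
  · intro p hp
    simp only [Finset.mem_filter, List.mem_toFinset, decide_eq_true_eq] at hp ⊢
    refine ⟨hp.2, ?_⟩
    have : (p.1 + u.1 - u.1, p.2 + u.2 - u.2) = p := by simp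
    rw [this]; exact hp.1
  · intro q hq
    simp only [Finset.mem_filter, List.mem_toFinset, decide_eq_true_eq] at hq ⊢
    refine ⟨hq.2, ?_⟩
    have : (q.1 - u.1 + u.1, q.2 - u.2 + u.2) = q := by simp
    rw [this]; exact hq.1
  · intro p _; simp
  · intro q _; simp

-- ===== VERDICT (by name: the statement is the Claim_ definition above) =====
theorem pvSumSplit (l : List (Int × Int)) (f1 f2 f3 f4 : (Int × Int) → Int) :
    (l.map (fun p => 4 - (f1 p + f2 p + f3 p + f4 p))).sum
      = 4 * l.length - ((l.map f1).sum + (l.map f2).sum + (l.map f3).sum + (l.map f4).sum) := by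
  induction l with
  | nil => simp
  | cons h t ih =>
      simp only [List.map_cons, List.sum_cons, List.length_cons]
      push_cast
      linarith [ih]

-- ===== VERDICT (by name: the statement is the Claim_ definition above) =====
theorem perimeter_estimate_spec : Claim_equal_perimeter_estimate := by
  intro points _ hpre
  unfold Spec_perimeter_estimate
  rw [pvA_eq_sum, pvB_eq_sum, pvSumSplit]
  have hrow := pvShiftCount points hpre (1, 0)
  have hcol := pvShiftCount points hpre (0, 1)
  simp only [add_zero, sub_zero] at hrow hcol
  have hsplit2 : (points.map (fun p => pvInd points (p.1, p.2 + 1) + pvInd points (p.1 + 1, p.2))).sum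
      = (points.map (fun p => pvInd points (p.1, p.2 + 1))).sum
        + (points.map (fun p => pvInd points (p.1 + 1, p.2))).sum :=
    PySem.List.sum_map_add_int _ _ _
  rw [hsplit2]
  linarith [hrow, hcol]
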